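-- pv_equiv track=rewrite | github.com/rockartx-code/gamification-multinivel | gamificacion-multinivel-f/lambda/handler.py | _would_create_leader_cycle
-- ===== SOURCE A (Python) =====
-- from typing import Any, Dict, List, Optional, Tuple, Union
--
-- def _would_create_leader_cycle(customers_raw: List[dict], customer_id: Any, leader_id: Any) -> bool:
--     if customer_id in (None, "") or leader_id in (None, ""):
--         return False
--     customer_id_str = str(customer_id)
--     current = str(leader_id)
--     leader_by_customer = {
--         str(item.get("customerId")): str(item.get("leaderId"))
--         for item in customers_raw
--         if item.get("customerId") not in (None, "") and item.get("leaderId") not in (None, "")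
--     }
--     seen = set()
--     while current and current not in seen:
--         if current == customer_id_str:
--             return True
--         seen.add(current)
--         current = leader_by_customer.get(current, "")
--     return False
-- ===== SOURCE B (Python) =====
-- def _would_create_leader_cycle(customers_raw, customer_id, leader_id):
--     if customer_id in (None, "") or leader_id in (None, ""):
--         return False
--     target = str(customer_id)
--     edges = {
--         str(item.get("customerId")): str(item.get("leaderId"))
--         for item in customers_raw
--         if item.get("customerId") not in (None, "") and item.get("leaderId") not in (None, "")
--     }
--     # Backward reachability closure: collect every node that transitively leads to target.
--     reach = {target}
--     for _ in range(len(edges) + 1):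
--         for c, l in edges.items():
--             if l in reach:
--                 reach.add(c)
--     return str(leader_id) in reach
-- ===== Notes on version B (the rewrite author's own statement) =====
-- stated objective: alternative
-- what changed: B replaces A's forward leader-chain chase with a visited set by a backward reachability closure: it repeatedly saturates the set of customers that transitively lead to customer_id (len(edges)+1 monotone rounds over the edge table) and then simply tests whether leader_id is in that set.
import Mathlib
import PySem

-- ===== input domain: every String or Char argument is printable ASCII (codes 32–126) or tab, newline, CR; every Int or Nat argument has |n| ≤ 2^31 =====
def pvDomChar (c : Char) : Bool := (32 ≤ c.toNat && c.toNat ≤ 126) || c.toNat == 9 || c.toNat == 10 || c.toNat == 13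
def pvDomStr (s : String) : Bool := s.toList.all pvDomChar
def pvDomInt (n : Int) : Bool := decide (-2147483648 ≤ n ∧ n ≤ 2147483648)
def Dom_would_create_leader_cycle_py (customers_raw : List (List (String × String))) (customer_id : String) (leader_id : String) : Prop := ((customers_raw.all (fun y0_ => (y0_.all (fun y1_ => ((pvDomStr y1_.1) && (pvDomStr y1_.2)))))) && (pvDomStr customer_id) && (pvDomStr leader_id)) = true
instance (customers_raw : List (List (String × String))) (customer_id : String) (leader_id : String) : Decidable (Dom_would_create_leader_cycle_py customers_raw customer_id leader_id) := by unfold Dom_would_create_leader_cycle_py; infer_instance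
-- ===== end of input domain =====

-- B replaces A's forward leader-chain chase (visited set) by a backward reachability closure
-- over the filtered edge table, then a single membership test (objective: alternative, same results).

-- ===== PORT A =====
-- item.get(k): first-match lookup in the dict (assoc list)
def pvGetKey (item : List (String × String)) (k : String) : Option String :=
  (PySem.Dict.mk item).get? k

-- the dict comprehension: insert (str cid, str lid) for each item passing the None/'' filter (later duplicates overwrite)
def pvBuildMap (customers_raw : List (List (String × String))) : PySem.Dict String String :=
  customers_raw.foldl (fun d item =>
    match pvGetKey item "customerId", pvGetKey item "leaderId" with
    | some c, some l => if c ≠ "" ∧ l ≠ "" then d.insert c l else d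
    | _, _ => d) PySem.Dict.empty

-- the while loop; fuel customers_raw.length + 2 always suffices: each iteration adds a new
-- element of {leader_id} ∪ (map keys) to seen, so at most length+1 iterations run.
def pvLoopA (m : PySem.Dict String String) (cid : String) : Nat → String → PySem.Set String → Bool
  | 0, _, _ => false
  | fuel+1, current, seen =>
    if current ≠ "" ∧ current ∉ seen then
      if current = cid then true
      else pvLoopA m cid fuel (m.getD current "") (PySem.Set.add seen current)
    else false

def would_create_leader_cycle_py (customers_raw : List (List (String × String))) (customer_id : String) (leader_id : String) : Bool :=
  if customer_id = "" ∨ leader_id = "" then false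
  else pvLoopA (pvBuildMap customers_raw) customer_id (customers_raw.length + 2) leader_id PySem.Set.empty

-- ===== PORT B =====
-- one saturation round: 'for c, l in edges.items(): if l in reach: reach.add(c)'
def pvRound (edges : List (String × String)) (reach : PySem.Set String) : PySem.Set String :=
  edges.foldl (fun acc p => if p.2 ∈ acc then PySem.Set.add acc p.1 else acc) reach

-- B builds the same filtered edge dict, then saturates the set of customers backward-reachable
-- from the target for len(edges)+1 rounds (the Python for-loop) and tests membership of leader_id.
def would_create_leader_cycle_py_alt (customers_raw : List (List (String × String))) (customer_id : String) (leader_id : String) : Bool :=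
  if customer_id = "" ∨ leader_id = "" then false
  else
    let edges := (pvBuildMap customers_raw).items
    let reach := (List.range (edges.length + 1)).foldl
      (fun acc _ => pvRound edges acc) (PySem.Set.add PySem.Set.empty customer_id)
    PySem.Set.contains reach leader_id

-- ===== PRECONDITION & SPEC =====
def Spec_would_create_leader_cycle_py (customers_raw : List (List (String × String))) (customer_id : String) (leader_id : String) (out : Bool) : Prop := out = would_create_leader_cycle_py_alt customers_raw customer_id leader_id
instance (customers_raw : List (List (String × String))) (customer_id : String) (leader_id : String) (out : Bool) : Decidable (Spec_would_create_leader_cycle_py customers_raw customer_id leader_id out) := by unfold Spec_would_create_leader_cycle_py; infer_instance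

-- ===== CLAIM (what is proved, stated in full; the proofs are below) =====
def Claim_equal_would_create_leader_cycle_py : Prop := ∀ (customers_raw : List (List (String × String))) (customer_id : String) (leader_id : String), Dom_would_create_leader_cycle_py customers_raw customer_id leader_id → Spec_would_create_leader_cycle_py customers_raw customer_id leader_id (would_create_leader_cycle_py customers_raw customer_id leader_id)

-- ===== LEMMAS AND PROOFS =====
-- the successor function of the chain: f x = leader_by_customer.get(x, "")
def pvF (raw : List (List (String × String))) (x : String) : String := (pvBuildMap raw).getD x ""

-- the fold step of pvBuildMap, named for the proofs
def pvStep (d : PySem.Dict String String) (item : List (String × String)) : PySem.Dict String String :=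
  match pvGetKey item "customerId", pvGetKey item "leaderId" with
  | some c, some l => if c ≠ "" ∧ l ≠ "" then d.insert c l else d
  | _, _ => d

theorem pvBuildMap_eq (raw : List (List (String × String))) :
    pvBuildMap raw = raw.foldl pvStep PySem.Dict.empty := rfl

theorem pvStep_cases (d : PySem.Dict String String) (item : List (String × String)) :
    pvStep d item = d ∨ ∃ c l, c ≠ "" ∧ l ≠ "" ∧ pvStep d item = d.insert c l := by
  unfold pvStep
  rcases pvGetKey item "customerId" with _ | c
  · exact Or.inl rfl
  rcases pvGetKey item "leaderId" with _ | v
  · exact Or.inl rfl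
  by_cases h : c ≠ "" ∧ v ≠ ""
  · exact Or.inr ⟨c, v, h.1, h.2, by simp [h]⟩
  · exact Or.inl (by simp [h])

theorem pv_fold_inv (P : PySem.Dict String String → Prop)
    (hstep : ∀ d item, P d → P (pvStep d item)) :
    ∀ (l : List (List (String × String))) (d : PySem.Dict String String),
      P d → P (l.foldl pvStep d) := by
  intro l
  induction l with
  | nil => intro d hd; simpa using hd
  | cons a rest ih => intro d hd; simp only [List.foldl_cons]; exact ih _ (hstep d a hd)

-- the dict's keys are unique
theorem pv_nodup_keys (raw : List (List (String × String))) : (pvBuildMap raw).keys.Nodup := by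
  rw [pvBuildMap_eq]
  refine pv_fold_inv (fun d => d.keys.Nodup) ?_ raw PySem.Dict.empty PySem.Dict.nodup_keys_empty
  intro d item hd
  rcases pvStep_cases d item with h | ⟨c, l, _, _, h⟩
  · rwa [h]
  · rw [h]; exact PySem.Dict.nodup_keys_insert _ _ _ hd

-- every key of the dict is nonempty
theorem pv_keys_ne_empty (raw : List (List (String × String))) :
    ∀ k ∈ (pvBuildMap raw).keys, k ≠ "" := by
  rw [pvBuildMap_eq]
  refine pv_fold_inv (fun d => ∀ k ∈ d.keys, k ≠ "") ?_ raw PySem.Dict.empty (by simp)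
  intro d item hd
  rcases pvStep_cases d item with h | ⟨c, l, hc, _, h⟩
  · rwa [h]
  · rw [h]
    intro k hk
    rcases (PySem.Dict.mem_keys_insert d c k l).mp hk with rfl | hk'
    · exact hc
    · exact hd k hk'

-- "" is a fixed point of the chain function
theorem pv_f_empty (raw : List (List (String × String))) : pvF raw "" = "" := by
  unfold pvF
  apply PySem.Dict.getD_of_not_contains
  rcases hb : (pvBuildMap raw).contains "" with _ | _
  · rfl
  · exact absurd rfl (pv_keys_ne_empty raw "" ((PySem.Dict.contains_iff_mem_keys _ _).mp hb))

theorem pv_iter_f_empty (raw : List (List (String × String))) (n : Nat) :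
    (pvF raw)^[n] "" = "" :=
  Function.iterate_fixed (pv_f_empty raw) n

-- an entry of the dict determines f on its key
theorem pv_f_of_mem_items (raw : List (List (String × String))) {c l : String}
    (h : (c, l) ∈ (pvBuildMap raw).items) : pvF raw c = l :=
  PySem.Dict.getD_of_mem_items _ h (pv_nodup_keys raw) ""

-- a point with nonempty successor is a key
theorem pv_mem_keys_of_f_ne (raw : List (List (String × String))) {x : String}
    (h : pvF raw x ≠ "") : x ∈ (pvBuildMap raw).keys := by
  by_contra hx
  apply h
  unfold pvF
  apply PySem.Dict.getD_of_not_contains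
  rcases hb : (pvBuildMap raw).contains x with _ | _
  · rfl
  · exact absurd ((PySem.Dict.contains_iff_mem_keys _ _).mp hb) hx

-- the dict has at most one key per raw item
theorem pv_keys_length_le (raw : List (List (String × String))) :
    (pvBuildMap raw).keys.length ≤ raw.length := by
  have haux : ∀ (l : List (List (String × String))) (d : PySem.Dict String String),
      (l.foldl pvStep d).keys.length ≤ d.keys.length + l.length := by
    intro l
    induction l with
    | nil => simp
    | cons a rest ih =>
      intro d
      simp only [List.foldl_cons, List.length_cons]
      refine le_trans (ih (pvStep d a)) ?_
      have hone : (pvStep d a).keys.length ≤ d.keys.length + 1 := by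
        rcases pvStep_cases d a with h | ⟨c, v, _, _, h⟩
        · rw [h]; omega
        · rw [h]
          rcases hc : d.contains c with _ | _
          · rw [PySem.Dict.keys_insert_of_not_contains _ _ hc, List.length_append]
            simp
          · rw [PySem.Dict.keys_insert_of_contains _ _ hc]; omega
      omega
  have h0 := haux raw PySem.Dict.empty
  rw [← pvBuildMap_eq] at h0
  simpa using h0

-- ==== A-side: the seen-set chase returns true iff some iterate of f reaches the target ====
theorem pv_loopA_sound (raw : List (List (String × String))) (cid : String) :
    ∀ (fuel : Nat) (cur : String) (seen : PySem.Set String),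
      pvLoopA (pvBuildMap raw) cid fuel cur seen = true → ∃ k, (pvF raw)^[k] cur = cid := by
  intro fuel
  induction fuel with
  | zero => intro cur seen h; simp [pvLoopA] at h
  | succ n ih =>
    intro cur seen h
    simp only [pvLoopA] at h
    by_cases h1 : cur ≠ "" ∧ cur ∉ seen
    · rw [if_pos h1] at h
      by_cases h2 : cur = cid
      · exact ⟨0, by simpa using h2⟩
      · rw [if_neg h2] at h
        obtain ⟨k, hk⟩ := ih _ _ h
        exact ⟨k + 1, by rw [Function.iterate_succ_apply]; exact hk⟩
    · rw [if_neg h1] at h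
      exact absurd h (by simp)

theorem pv_loopA_complete (raw : List (List (String × String))) (cid : String) (hcid : cid ≠ "") :
    ∀ (k : Nat) (cur : String) (seen : PySem.Set String) (fuel : Nat),
      (pvF raw)^[k] cur = cid → (∀ j, j < k → (pvF raw)^[j] cur ≠ cid) →
      (∀ j, j ≤ k → (pvF raw)^[j] cur ∉ seen) → k < fuel →
      pvLoopA (pvBuildMap raw) cid fuel cur seen = true := by
  intro k
  induction k with
  | zero =>
    intro cur seen fuel h0 _ hseen hfuel
    obtain ⟨m, rfl⟩ : ∃ m, fuel = m + 1 := ⟨fuel - 1, by omega⟩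
    simp only [Function.iterate_zero_apply] at h0
    subst h0
    simp only [pvLoopA]
    rw [if_pos ⟨hcid, by simpa using hseen 0 (le_refl 0)⟩]
    simp
  | succ n ih =>
    intro cur seen fuel h0 hmin hseen hfuel
    obtain ⟨m, rfl⟩ : ∃ m, fuel = m + 1 := ⟨fuel - 1, by omega⟩
    have hcur_ne : cur ≠ "" := by
      intro he
      rw [he, pv_iter_f_empty raw (n+1)] at h0
      exact hcid h0.symm
    have hcur_seen : cur ∉ seen := by simpa using hseen 0 (Nat.zero_le _)
    have hcur_ne_cid : cur ≠ cid := by simpa using hmin 0 (Nat.succ_pos n)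
    simp only [pvLoopA]
    rw [if_pos ⟨hcur_ne, hcur_seen⟩, if_neg hcur_ne_cid]
    refine ih (pvF raw cur) (PySem.Set.add seen cur) m ?_ ?_ ?_ (by omega)
    · rw [← Function.iterate_succ_apply]; exact h0
    · intro j hj; rw [← Function.iterate_succ_apply]; exact hmin (j+1) (by omega)
    · intro j hj
      rw [← Function.iterate_succ_apply]
      rw [PySem.Set.mem_add]
      push_neg
      refine ⟨hseen (j+1) (by omega), ?_⟩
      intro heq
      have h2 : (pvF raw)^[n - j] cur = cid := by
        have hsplit : n + 1 = (n - j) + (j + 1) := by omega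
        rw [hsplit, Function.iterate_add_apply, heq] at h0
        exact h0
      exact hmin (n - j) (by omega) h2

-- a minimal witness is bounded by the number of keys
theorem pv_reach_bound (raw : List (List (String × String))) (cid lid : String) (hcid : cid ≠ "")
    (h : ∃ k, (pvF raw)^[k] lid = cid) :
    ∃ k, (pvF raw)^[k] lid = cid ∧ (∀ j, j < k → (pvF raw)^[j] lid ≠ cid) ∧
      k ≤ (pvBuildMap raw).keys.length := by
  refine ⟨Nat.find h, Nat.find_spec h, fun j hj => Nat.find_min h hj, ?_⟩
  have hne : ∀ j, j ≤ Nat.find h → (pvF raw)^[j] lid ≠ "" := by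
    intro j hj he
    have hall : (pvF raw)^[Nat.find h] lid = "" := by
      have hsplit : Nat.find h = (Nat.find h - j) + j := by omega
      rw [hsplit, Function.iterate_add_apply, he, pv_iter_f_empty]
    exact hcid (by rw [← Nat.find_spec h, hall])
  have hkeys : ∀ j, j < Nat.find h → (pvF raw)^[j] lid ∈ (pvBuildMap raw).keys := by
    intro j hj
    apply pv_mem_keys_of_f_ne
    rw [← Function.iterate_succ_apply' (pvF raw) j lid]
    exact hne (j+1) (by omega)
  have key : ∀ i j, i < j → j ≤ Nat.find h → (pvF raw)^[i] lid = (pvF raw)^[j] lid → False := by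
    intro i j hij hjk heq
    have hcid2 : (pvF raw)^[(Nat.find h - j) + i] lid = cid := by
      calc (pvF raw)^[(Nat.find h - j) + i] lid
          = (pvF raw)^[Nat.find h - j] ((pvF raw)^[i] lid) := Function.iterate_add_apply _ _ _ _
        _ = (pvF raw)^[Nat.find h - j] ((pvF raw)^[j] lid) := by rw [heq]
        _ = (pvF raw)^[(Nat.find h - j) + j] lid := (Function.iterate_add_apply _ _ _ _).symm
        _ = cid := by rw [show (Nat.find h - j) + j = Nat.find h by omega]; exact Nat.find_spec h
    exact Nat.find_min h (by omega) hcid2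
  have hinj : Set.InjOn (fun j => (pvF raw)^[j] lid) ↑(Finset.range (Nat.find h)) := by
    intro i hi j hj hij
    simp only [Finset.coe_range, Set.mem_Iio] at hi hj
    by_contra hne2
    rcases Nat.lt_or_ge i j with hlt | hge
    · exact key i j hlt (by omega) hij
    · exact key j i (by omega) (by omega) hij.symm
  have himg : (Finset.range (Nat.find h)).image (fun j => (pvF raw)^[j] lid) ⊆
      (pvBuildMap raw).keys.toFinset := by
    intro x hx
    simp only [Finset.mem_image] at hx
    obtain ⟨j, hj, rfl⟩ := hx
    exact List.mem_toFinset.mpr (hkeys j (Finset.mem_range.mp hj))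
  have hcard := Finset.card_le_card himg
  rw [Finset.card_image_of_injOn hinj, Finset.card_range] at hcard
  have hlen := List.toFinset_card_le (pvBuildMap raw).keys
  omega

theorem pv_A_iff (raw : List (List (String × String))) (cid lid : String)
    (hcid : cid ≠ "") :
    pvLoopA (pvBuildMap raw) cid (raw.length + 2) lid PySem.Set.empty = true ↔
      ∃ k, (pvF raw)^[k] lid = cid := by
  constructor
  · exact pv_loopA_sound raw cid _ lid _
  · intro h
    obtain ⟨k, hk, hmin, hbound⟩ := pv_reach_bound raw cid lid hcid h
    have hkl := pv_keys_length_le raw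
    exact pv_loopA_complete raw cid hcid k lid PySem.Set.empty _ hk hmin
      (by intro j _; simp [PySem.Set.empty]) (by omega)

-- ==== B-side: the saturated set is exactly the set of points some iterate of which is the target ====
theorem pvRound_nil (R : PySem.Set String) : pvRound [] R = R := rfl

theorem pvRound_cons (p : String × String) (rest : List (String × String)) (R : PySem.Set String) :
    pvRound (p :: rest) R = pvRound rest (if p.2 ∈ R then PySem.Set.add R p.1 else R) := rfl

theorem pv_mem_round_of_mem (es : List (String × String)) :
    ∀ (R : PySem.Set String) (x : String), x ∈ R → x ∈ pvRound es R := by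
  induction es with
  | nil => intro R x hx; rwa [pvRound_nil]
  | cons p rest ih =>
    intro R x hx
    rw [pvRound_cons]
    apply ih
    split
    · exact (PySem.Set.mem_add R p.1 x).mpr (Or.inl hx)
    · exact hx

theorem pv_nodup_round (es : List (String × String)) :
    ∀ (R : PySem.Set String), R.Nodup → (pvRound es R).Nodup := by
  induction es with
  | nil => intro R hR; rwa [pvRound_nil]
  | cons p rest ih =>
    intro R hR
    rw [pvRound_cons]
    apply ih
    split
    · exact PySem.Set.nodup_add _ _ hR
    · exact hR

theorem pv_round_subset (cid : String) (K : List String) :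
    ∀ (es : List (String × String)), (∀ p ∈ es, p.1 ∈ K) →
      ∀ (R : PySem.Set String), (∀ x ∈ R, x = cid ∨ x ∈ K) →
        ∀ x ∈ pvRound es R, x = cid ∨ x ∈ K := by
  intro es
  induction es with
  | nil => intro _ R hR x hx; exact hR x (by rwa [pvRound_nil] at hx)
  | cons p rest ih =>
    intro hes R hR x hx
    rw [pvRound_cons] at hx
    refine ih (fun q hq => hes q (List.mem_cons_of_mem _ hq)) _ ?_ x hx
    intro y hy
    by_cases hmem : p.2 ∈ R
    · rw [if_pos hmem] at hy
      rcases (PySem.Set.mem_add R p.1 y).mp hy with h | rfl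
      · exact hR y h
      · exact Or.inr (hes p List.mem_cons_self)
    · rw [if_neg hmem] at hy
      exact hR y hy

theorem pv_round_append (es : List (String × String)) :
    ∀ (R : PySem.Set String), ∃ t, pvRound es R = R ++ t := by
  induction es with
  | nil => intro R; exact ⟨[], by rw [pvRound_nil, List.append_nil]⟩
  | cons p rest ih =>
    intro R
    obtain ⟨t, ht⟩ := ih (if p.2 ∈ R then PySem.Set.add R p.1 else R)
    rw [pvRound_cons]
    by_cases hmem : p.2 ∈ R
    · by_cases h1 : p.1 ∈ R
      · refine ⟨t, ?_⟩
        rw [ht, if_pos hmem, PySem.Set.add_of_mem h1]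
      · refine ⟨p.1 :: t, ?_⟩
        rw [ht, if_pos hmem, PySem.Set.add_of_not_mem h1]
        simp
    · refine ⟨t, ?_⟩
      rw [ht, if_neg hmem]

theorem pv_round_sound (raw : List (List (String × String))) (cid : String) :
    ∀ (es : List (String × String)), (∀ p ∈ es, p ∈ (pvBuildMap raw).items) →
      ∀ (R : PySem.Set String), (∀ y ∈ R, ∃ k, (pvF raw)^[k] y = cid) →
        ∀ y ∈ pvRound es R, ∃ k, (pvF raw)^[k] y = cid := by
  intro es
  induction es with
  | nil => intro _ R hR y hy; exact hR y (by rwa [pvRound_nil] at hy)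
  | cons p rest ih =>
    intro hes R hR y hy
    rw [pvRound_cons] at hy
    refine ih (fun q hq => hes q (List.mem_cons_of_mem _ hq)) _ ?_ y hy
    intro z hz
    by_cases hmem : p.2 ∈ R
    · rw [if_pos hmem] at hz
      rcases (PySem.Set.mem_add R p.1 z).mp hz with h | rfl
      · exact hR z h
      · obtain ⟨k, hk⟩ := hR p.2 hmem
        refine ⟨k + 1, ?_⟩
        have hf : pvF raw p.1 = p.2 :=
          pv_f_of_mem_items raw (by simpa using hes p List.mem_cons_self)
        rw [Function.iterate_succ_apply, hf]
        exact hk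
    · rw [if_neg hmem] at hz
      exact hR z hz

theorem pv_round_reflect (es : List (String × String)) :
    ∀ (R : PySem.Set String) (c l : String), (c, l) ∈ es → l ∈ R → c ∈ pvRound es R := by
  induction es with
  | nil => intro R c l h; exact absurd h (by simp)
  | cons p rest ih =>
    intro R c l hcl hl
    rw [pvRound_cons]
    rcases List.mem_cons.mp hcl with heq | hcl'
    · apply pv_mem_round_of_mem
      rw [← heq]
      simp only
      rw [if_pos hl]
      exact (PySem.Set.mem_add R c c).mpr (Or.inr rfl)
    · refine ih _ c l hcl' ?_
      split
      · exact (PySem.Set.mem_add R p.1 l).mpr (Or.inl hl)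
      · exact hl

theorem pv_foldl_range_const {α : Type} (g : α → α) :
    ∀ (n : Nat) (R : α), (List.range n).foldl (fun acc _ => g acc) R = g^[n] R := by
  intro n
  induction n with
  | zero => intro R; simp
  | succ n ih =>
    intro R
    rw [List.range_succ, List.foldl_append, ih]
    simp only [List.foldl_cons, List.foldl_nil]
    exact (Function.iterate_succ_apply' g n R).symm

theorem pv_len_bound (cid : String) (K : List String) (R : PySem.Set String)
    (hnd : R.Nodup) (hsub : ∀ x ∈ R, x = cid ∨ x ∈ K) : R.length ≤ K.length + 1 := by
  have h1 : R.toFinset ⊆ insert cid K.toFinset := by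
    intro x hx
    rcases hsub x (List.mem_toFinset.mp hx) with rfl | h
    · exact Finset.mem_insert_self _ _
    · exact Finset.mem_insert_of_mem (List.mem_toFinset.mpr h)
  have h2 := Finset.card_le_card h1
  rw [List.toFinset_card_of_nodup hnd] at h2
  have h3 := Finset.card_insert_le cid K.toFinset
  have h4 := List.toFinset_card_le K
  omega

theorem pv_fst_mem_keys (raw : List (List (String × String))) :
    ∀ p ∈ (pvBuildMap raw).items, p.1 ∈ (pvBuildMap raw).keys := by
  intro p hp
  exact PySem.Dict.mem_keys_of_mem_items _ hp

theorem pv_keys_len (raw : List (List (String × String))) :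
    (pvBuildMap raw).keys.length = (pvBuildMap raw).items.length := by
  simp [PySem.Dict.keys]

theorem pv_stabilize (raw : List (List (String × String))) (cid : String) :
    ∀ (n : Nat) (R : PySem.Set String), R.Nodup →
      (∀ x ∈ R, x = cid ∨ x ∈ (pvBuildMap raw).keys) →
      (pvBuildMap raw).keys.length + 2 ≤ n + R.length →
      pvRound (pvBuildMap raw).items ((pvRound (pvBuildMap raw).items)^[n] R) =
        (pvRound (pvBuildMap raw).items)^[n] R := by
  intro n
  induction n with
  | zero =>
    intro R hnd hsub hbound
    exfalso
    have := pv_len_bound cid _ R hnd hsub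
    omega
  | succ n ih =>
    intro R hnd hsub hbound
    by_cases hfix : pvRound (pvBuildMap raw).items R = R
    · rw [Function.iterate_fixed hfix]
      exact hfix
    · obtain ⟨t, ht⟩ := pv_round_append (pvBuildMap raw).items R
      have htne : t ≠ [] := by
        intro h0
        apply hfix
        rw [ht, h0, List.append_nil]
      have hlen : R.length + 1 ≤ (pvRound (pvBuildMap raw).items R).length := by
        rw [ht, List.length_append]
        have := List.length_pos_of_ne_nil htne
        omega
      rw [Function.iterate_succ_apply]
      exact ih (pvRound (pvBuildMap raw).items R)
        (pv_nodup_round _ R hnd)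
        (pv_round_subset cid _ _ (pv_fst_mem_keys raw) R hsub)
        (by omega)

theorem pv_B_iff (raw : List (List (String × String))) (cid lid : String) (hcid : cid ≠ "") :
    lid ∈ (pvRound (pvBuildMap raw).items)^[(pvBuildMap raw).items.length + 1] [cid] ↔
      ∃ k, (pvF raw)^[k] lid = cid := by
  have hsub0 : ∀ x ∈ ([cid] : PySem.Set String), x = cid ∨ x ∈ (pvBuildMap raw).keys := by
    intro x hx
    exact Or.inl (by simpa using hx)
  have hfix : pvRound (pvBuildMap raw).items
      ((pvRound (pvBuildMap raw).items)^[(pvBuildMap raw).items.length + 1] [cid]) =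
      (pvRound (pvBuildMap raw).items)^[(pvBuildMap raw).items.length + 1] [cid] := by
    refine pv_stabilize raw cid _ [cid] (List.nodup_singleton cid) hsub0 ?_
    rw [pv_keys_len raw]
    simp
  constructor
  · have hs : ∀ n y, y ∈ (pvRound (pvBuildMap raw).items)^[n] [cid] →
        ∃ k, (pvF raw)^[k] y = cid := by
      intro n
      induction n with
      | zero =>
        intro y hy
        simp only [Function.iterate_zero_apply] at hy
        exact ⟨0, by simpa using hy⟩
      | succ n ih =>
        intro y hy
        rw [Function.iterate_succ_apply'] at hy
        exact pv_round_sound raw cid (pvBuildMap raw).items (fun p hp => hp) _ ih y hy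
    exact hs _ lid
  · intro h
    obtain ⟨k, hk⟩ := h
    have hmono : ∀ (n : Nat) (R : PySem.Set String) (x : String),
        x ∈ R → x ∈ (pvRound (pvBuildMap raw).items)^[n] R := by
      intro n
      induction n with
      | zero => intro R x hx; simpa using hx
      | succ n ih =>
        intro R x hx
        rw [Function.iterate_succ_apply']
        exact pv_mem_round_of_mem _ _ _ (ih R x hx)
    have hc : ∀ (k : Nat) (y : String), (pvF raw)^[k] y = cid →
        y ∈ (pvRound (pvBuildMap raw).items)^[(pvBuildMap raw).items.length + 1] [cid] := by
      intro k
      induction k with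
      | zero =>
        intro y hy
        simp only [Function.iterate_zero_apply] at hy
        subst hy
        exact hmono _ _ _ (by simp)
      | succ k ih =>
        intro y hy
        rw [Function.iterate_succ_apply] at hy
        have hyF := ih _ hy
        have hfy : pvF raw y ≠ "" := by
          intro h0
          rw [h0, pv_iter_f_empty] at hy
          exact hcid hy.symm
        have hyk : y ∈ (pvBuildMap raw).keys := pv_mem_keys_of_f_ne raw hfy
        have hget : (pvBuildMap raw).get? y = some (pvF raw y) := by
          rcases hv : (pvBuildMap raw).get? y with _ | v
          · exact absurd hyk ((PySem.Dict.get?_eq_none_iff_not_mem_keys _ _).mp hv)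
          · rw [show pvF raw y = v from PySem.Dict.getD_of_get?_eq_some _ "" hv]
        have hitem : (y, pvF raw y) ∈ (pvBuildMap raw).items :=
          PySem.Dict.mem_items_of_get?_eq_some _ hget
        have hmem := pv_round_reflect (pvBuildMap raw).items _ y (pvF raw y) hitem hyF
        rwa [hfix] at hmem
    exact hc k lid hk

-- ===== VERDICT (by name: the statement is the Claim_ definition above) =====
theorem would_create_leader_cycle_py_spec : Claim_equal_would_create_leader_cycle_py := by
  intro raw cid lid _
  unfold Spec_would_create_leader_cycle_py
  by_cases hg : cid = "" ∨ lid = ""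
  · simp only [would_create_leader_cycle_py, would_create_leader_cycle_py_alt, if_pos hg]
  · have hg' := hg
    push_neg at hg'
    obtain ⟨hcid, -⟩ := hg'
    simp only [would_create_leader_cycle_py, would_create_leader_cycle_py_alt, if_neg hg]
    rw [Bool.eq_iff_iff, pv_A_iff raw cid lid hcid, PySem.Set.contains_iff,
      pv_foldl_range_const]
    rw [show PySem.Set.add PySem.Set.empty cid = [cid] from rfl]
    exact (pv_B_iff raw cid lid hcid).symm
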